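-- pv_equiv track=rewrite | github.com/yangha7/dials_agent | dials_agent/core/tools.py | determine_workflow_stage
-- ===== SOURCE A (Python) =====
-- FILE_TO_STAGE = {
--     "imported.expt": "import",
--     "strong.refl": "find_spots",
--     "indexed.expt": "index",
--     "indexed.refl": "index",
--     "refined.expt": "refine",
--     "refined.refl": "refine",
--     "integrated.expt": "integrate",
--     "integrated.refl": "integrate",
--     "symmetrized.expt": "symmetry",
--     "symmetrized.refl": "symmetry",
--     "scaled.expt": "scale",
--     "scaled.refl": "scale",
-- }
--
-- def determine_workflow_stage(files: list[str]) -> tuple[str, str]: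
--     """
--     Determine the current workflow stage based on existing files.
--
--     Args:
--         files: List of filenames in the working directory
--
--     Returns:
--         Tuple of (current_stage, suggested_next_step)
--     """
--     stages_completed = set()
--
--     for filename in files:
--         if filename in FILE_TO_STAGE:
--             stages_completed.add(FILE_TO_STAGE[filename])
--
--     # Determine current stage and next step
--     workflow_order = ["import", "image_viewer", "find_spots", "index", "refine", "integrate", "symmetry", "scale", "export"]
--
--     current_stage = "none"
--     for stage in reversed(workflow_order):
--         if stage in stages_completed:
--             current_stage = stage
--             break
--
--     # Suggest next step
--     if current_stage == "none":
--         next_step = "import"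
--     else:
--         try:
--             current_idx = workflow_order.index(current_stage)
--             if current_idx < len(workflow_order) - 1:
--                 next_step = workflow_order[current_idx + 1]
--             else:
--                 next_step = "complete"
--         except ValueError:
--             next_step = "import"
--
--     return current_stage, next_step
-- ===== SOURCE B (Python) =====
-- _WORKFLOW_ORDER = ["import", "image_viewer", "find_spots", "index", "refine", "integrate", "symmetry", "scale", "export"]
--
-- # Each recognized filename mapped straight to its stage's index in _WORKFLOW_ORDER.
-- _FILE_TO_INDEX = {
--     "imported.expt": 0,
--     "strong.refl": 2,
--     "indexed.expt": 3,
--     "indexed.refl": 3,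
--     "refined.expt": 4,
--     "refined.refl": 4,
--     "integrated.expt": 5,
--     "integrated.refl": 5,
--     "symmetrized.expt": 6,
--     "symmetrized.refl": 6,
--     "scaled.expt": 7,
--     "scaled.refl": 7,
-- }
--
-- def determine_workflow_stage(files: list[str]) -> tuple[str, str]:
--     """Single pass: track the furthest-reached workflow index; render at the end."""
--     best = -1
--     for filename in files:
--         i = _FILE_TO_INDEX.get(filename, -1)
--         if i > best:
--             best = i
--     if best == -1:
--         return ("none", "import")
--     next_step = _WORKFLOW_ORDER[best + 1] if best + 1 < len(_WORKFLOW_ORDER) else "complete"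
--     return (_WORKFLOW_ORDER[best], next_step)
-- ===== Notes on version B (the rewrite author's own statement) =====
-- stated objective: simpler
-- what changed: Replaced A's three phases (build a set of completed stages, reverse-scan the workflow list for the furthest one, then re-find its index with list.index) by one pass over files maintaining a single max workflow-index accumulator via a filename-to-index dict, rendering the result at the end.
import Mathlib
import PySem

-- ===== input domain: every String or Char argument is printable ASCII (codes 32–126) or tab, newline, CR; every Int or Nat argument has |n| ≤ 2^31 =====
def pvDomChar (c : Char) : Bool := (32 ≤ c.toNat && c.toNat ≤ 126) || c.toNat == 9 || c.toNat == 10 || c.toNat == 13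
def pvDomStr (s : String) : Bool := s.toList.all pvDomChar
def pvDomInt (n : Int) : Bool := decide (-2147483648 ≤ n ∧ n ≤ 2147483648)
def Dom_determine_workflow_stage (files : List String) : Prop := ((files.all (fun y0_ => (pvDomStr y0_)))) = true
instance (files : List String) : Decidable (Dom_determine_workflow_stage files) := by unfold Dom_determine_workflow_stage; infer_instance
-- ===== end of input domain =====

-- B replaces A's set-then-reverse-scan-then-index phases by one max-index pass; objective: simpler.

-- ===== PORT A =====
def pvFileToStage : PySem.Dict String String := PySem.Dict.ofList
  [("imported.expt", "import"), ("strong.refl", "find_spots"),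
   ("indexed.expt", "index"), ("indexed.refl", "index"),
   ("refined.expt", "refine"), ("refined.refl", "refine"),
   ("integrated.expt", "integrate"), ("integrated.refl", "integrate"),
   ("symmetrized.expt", "symmetry"), ("symmetrized.refl", "symmetry"),
   ("scaled.expt", "scale"), ("scaled.refl", "scale")]

def pvWorkflowOrder : List String :=
  ["import", "image_viewer", "find_spots", "index", "refine", "integrate", "symmetry", "scale", "export"]

-- the 'for stage in reversed(workflow_order): if stage in stages_completed: break' loop
def pvScanStage : List String → PySem.Set String → String
  | [], _ => "none"
  | s :: rest, done => if PySem.Set.contains done s then s else pvScanStage rest done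

def determine_workflow_stage (files : List String) : String × String :=
  let stages_completed : PySem.Set String :=
    files.foldl (fun s filename =>
      if pvFileToStage.contains filename then
        PySem.Set.add s (pvFileToStage.getD filename "")   -- FILE_TO_STAGE[filename]: guarded by 'in', so getD is exact
      else s) PySem.Set.empty
  let current_stage := pvScanStage pvWorkflowOrder.reverse stages_completed
  let next_step :=
    if current_stage = "none" then "import"
    else
      match PySem.List.index? pvWorkflowOrder current_stage with   -- .index; ValueError → none → the except branch
      | some idx =>
          if (idx : Int) < (pvWorkflowOrder.length : Int) - 1 then
            (PySem.List.pyGet? pvWorkflowOrder ((idx : Int) + 1)).getD ""  -- index < len-1, so in range: getD never fires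
          else "complete"
      | none => "import"
  (current_stage, next_step)

-- ===== PORT B =====
def pvWf : List String :=
  ["import", "image_viewer", "find_spots", "index", "refine", "integrate", "symmetry", "scale", "export"]

def pvFileToIdx : PySem.Dict String Int := PySem.Dict.ofList
  [("imported.expt", 0), ("strong.refl", 2),
   ("indexed.expt", 3), ("indexed.refl", 3),
   ("refined.expt", 4), ("refined.refl", 4),
   ("integrated.expt", 5), ("integrated.refl", 5),
   ("symmetrized.expt", 6), ("symmetrized.refl", 6),
   ("scaled.expt", 7), ("scaled.refl", 7)]

def determine_workflow_stage_alt (files : List String) : String × String :=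
  let best : Int := files.foldl (fun b filename =>
    let i := pvFileToIdx.getD filename (-1)
    if i > b then i else b) (-1)
  if best = -1 then ("none", "import")
  else
    ((PySem.List.pyGet? pvWf best).getD "",          -- best ∈ [0,7] < len: in range, getD never fires
     if best + 1 < (pvWf.length : Int) then (PySem.List.pyGet? pvWf (best + 1)).getD ""
     else "complete")

-- ===== PRECONDITION & SPEC =====
def Spec_determine_workflow_stage (files : List String) (out : String × String) : Prop := out = determine_workflow_stage_alt files
instance (files : List String) (out : String × String) : Decidable (Spec_determine_workflow_stage files out) := by unfold Spec_determine_workflow_stage; infer_instance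

-- ===== CLAIM (what is proved, stated in full; the proofs are below) =====
def Claim_equal_determine_workflow_stage : Prop := ∀ (files : List String), Dom_determine_workflow_stage files → Spec_determine_workflow_stage files (determine_workflow_stage files)

-- ===== LEMMAS AND PROOFS =====

def pvKeys : List String :=
  ["imported.expt", "strong.refl", "indexed.expt", "indexed.refl", "refined.expt", "refined.refl",
   "integrated.expt", "integrated.refl", "symmetrized.expt", "symmetrized.refl", "scaled.expt", "scaled.refl"]

def stageList : List String := ["import", "find_spots", "index", "refine", "integrate", "symmetry", "scale"]

def stIdx (s : String) : Int :=
  if s = "import" then 0 else if s = "find_spots" then 2 else if s = "index" then 3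
  else if s = "refine" then 4 else if s = "integrate" then 5 else if s = "symmetry" then 6
  else if s = "scale" then 7 else -1

def pvInv (S : PySem.Set String) (b : Int) : Prop :=
  b ∈ ([-1, 0, 2, 3, 4, 5, 6, 7] : List Int) ∧
  (∀ s ∈ S, s ∈ stageList ∧ stIdx s ≤ b) ∧
  (b ≠ -1 → ∃ s ∈ S, stIdx s = b)

def stepA (S : PySem.Set String) (filename : String) : PySem.Set String :=
  if pvFileToStage.contains filename then PySem.Set.add S (pvFileToStage.getD filename "") else S

def stepB (b : Int) (filename : String) : Int :=
  let i := pvFileToIdx.getD filename (-1)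
  if i > b then i else b

lemma keys_fts : pvFileToStage.keys = pvKeys := by decide

lemma keys_fti : pvFileToIdx.keys = pvKeys := by decide

lemma fcase (f : String) :
    (pvFileToStage.contains f = false ∧ pvFileToIdx.getD f (-1) = -1)
  ∨ (∃ v, pvFileToStage.contains f = true ∧ pvFileToStage.getD f "" = v ∧ v ∈ stageList
        ∧ pvFileToIdx.getD f (-1) = stIdx v ∧ stIdx v ∈ ([0, 2, 3, 4, 5, 6, 7] : List Int)) := by
  by_cases hk : f ∈ pvKeys
  · right
    fin_cases hk
    · exact ⟨"import", by decide⟩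
    · exact ⟨"find_spots", by decide⟩
    · exact ⟨"index", by decide⟩
    · exact ⟨"index", by decide⟩
    · exact ⟨"refine", by decide⟩
    · exact ⟨"refine", by decide⟩
    · exact ⟨"integrate", by decide⟩
    · exact ⟨"integrate", by decide⟩
    · exact ⟨"symmetry", by decide⟩
    · exact ⟨"symmetry", by decide⟩
    · exact ⟨"scale", by decide⟩
    · exact ⟨"scale", by decide⟩
  · left
    have hc1 : pvFileToStage.contains f = false := by
      by_contra h
      rw [Bool.not_eq_false, PySem.Dict.contains_iff_mem_keys, keys_fts] at h
      exact hk h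
    have hc2 : pvFileToIdx.contains f = false := by
      by_contra h
      rw [Bool.not_eq_false, PySem.Dict.contains_iff_mem_keys, keys_fti] at h
      exact hk h
    exact ⟨hc1, PySem.Dict.getD_of_not_contains _ _ hc2⟩

lemma step_inv (f : String) (S : PySem.Set String) (b : Int) (h : pvInv S b) :
    pvInv (stepA S f) (stepB b f) := by
  obtain ⟨hb, h1, h2⟩ := h
  have hb' : b = -1 ∨ b = 0 ∨ b = 2 ∨ b = 3 ∨ b = 4 ∨ b = 5 ∨ b = 6 ∨ b = 7 := by simpa using hb
  have hbge : (-1 : Int) ≤ b := by omega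
  rcases fcase f with ⟨hc, hg⟩ | ⟨v, hc, hg, hvl, hgi, hvi⟩
  · have : stepB b f = b := by simp [stepB, hg]; omega
    rw [this, stepA, hc]
    exact ⟨hb, h1, h2⟩
  · have hvi' : stIdx v = 0 ∨ stIdx v = 2 ∨ stIdx v = 3 ∨ stIdx v = 4 ∨ stIdx v = 5 ∨ stIdx v = 6 ∨ stIdx v = 7 := by
      simpa using hvi
    have hvge : (0 : Int) ≤ stIdx v := by omega
    rw [stepA, hc, if_pos rfl, hg]
    by_cases hlt : stIdx v > b
    · have hB : stepB b f = stIdx v := by simp [stepB, hgi, hlt]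
      rw [hB]
      refine ⟨by simp only [List.mem_cons]; omega, ?_, ?_⟩
      · intro s hs
        rcases (PySem.Set.mem_add S v s).mp hs with hs' | hs'
        · exact ⟨(h1 s hs').1, le_trans (h1 s hs').2 (le_of_lt hlt)⟩
        · subst hs'; exact ⟨hvl, le_refl _⟩
      · intro _
        exact ⟨v, (PySem.Set.mem_add S v v).mpr (Or.inr rfl), rfl⟩
    · have hB : stepB b f = b := by simp [stepB, hgi, hlt]
      rw [hB]
      refine ⟨hb, ?_, ?_⟩
      · intro s hs
        rcases (PySem.Set.mem_add S v s).mp hs with hs' | hs'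
        · exact h1 s hs'
        · subst hs'; exact ⟨hvl, by omega⟩
      · intro hne
        obtain ⟨s, hsS, hsi⟩ := h2 hne
        exact ⟨s, (PySem.Set.mem_add S v s).mpr (Or.inl hsS), hsi⟩

lemma fold_inv : ∀ (files : List String) (S : PySem.Set String) (b : Int), pvInv S b →
    pvInv (files.foldl stepA S) (files.foldl stepB b) := by
  intro files
  induction files with
  | nil => intro S b h; exact h
  | cons f rest ih =>
      intro S b h
      exact ih _ _ (step_inv f S b h)

def pvArender (S : PySem.Set String) : String × String :=
  let current_stage := pvScanStage pvWorkflowOrder.reverse S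
  let next_step :=
    if current_stage = "none" then "import"
    else
      match PySem.List.index? pvWorkflowOrder current_stage with
      | some idx =>
          if (idx : Int) < (pvWorkflowOrder.length : Int) - 1 then
            (PySem.List.pyGet? pvWorkflowOrder ((idx : Int) + 1)).getD ""
          else "complete"
      | none => "import"
  (current_stage, next_step)

def pvBrender (b : Int) : String × String :=
  if b = -1 then ("none", "import")
  else
    ((PySem.List.pyGet? pvWf b).getD "",
     if b + 1 < (pvWf.length : Int) then (PySem.List.pyGet? pvWf (b + 1)).getD "" else "complete")

lemma no_mem (S : PySem.Set String) (b : Int)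
    (h1 : ∀ s ∈ S, s ∈ stageList ∧ stIdx s ≤ b)
    (x : String) (hx : x ∈ stageList → b < stIdx x) : x ∉ S := by
  intro hc
  obtain ⟨hs, hle⟩ := h1 x hc
  exact absurd hle (not_le.mpr (hx hs))

lemma render_eq (S : PySem.Set String) (b : Int) (h : pvInv S b) : pvArender S = pvBrender b := by
  obtain ⟨hb, h1, h2⟩ := h
  have hrev : pvWorkflowOrder.reverse = ["export", "scale", "symmetry", "integrate", "refine", "index", "find_spots", "image_viewer", "import"] := by decide
  fin_cases hb
  · -- b = -1
    have hpos : ∀ x ∈ stageList, (-1 : Int) < stIdx x := by decide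
    have hall : ∀ x, x ∉ S := fun x => no_mem S (-1) h1 x (hpos x)
    have hcs : pvScanStage pvWorkflowOrder.reverse S = "none" := by
      rw [hrev]; simp [pvScanStage, hall]
    simp only [pvArender, hcs]; decide
  · -- b = 0
    obtain ⟨s, hsS, hsi⟩ := h2 (by decide)
    have hs : s = "import" := (by decide : ∀ x ∈ stageList, stIdx x = 0 → x = "import") s (h1 s hsS).1 hsi
    have hm : "import" ∈ S := hs ▸ hsS
    have e0 : "export" ∉ S := no_mem S 0 h1 "export" (by decide)
    have e1 : "scale" ∉ S := no_mem S 0 h1 "scale" (by decide)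
    have e2 : "symmetry" ∉ S := no_mem S 0 h1 "symmetry" (by decide)
    have e3 : "integrate" ∉ S := no_mem S 0 h1 "integrate" (by decide)
    have e4 : "refine" ∉ S := no_mem S 0 h1 "refine" (by decide)
    have e5 : "index" ∉ S := no_mem S 0 h1 "index" (by decide)
    have e6 : "find_spots" ∉ S := no_mem S 0 h1 "find_spots" (by decide)
    have e7 : "image_viewer" ∉ S := no_mem S 0 h1 "image_viewer" (by decide)
    have hcs : pvScanStage pvWorkflowOrder.reverse S = "import" := by
      rw [hrev]; simp [pvScanStage, hm, e0, e1, e2, e3, e4, e5, e6, e7]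
    simp only [pvArender, hcs]; decide
  · -- b = 2
    obtain ⟨s, hsS, hsi⟩ := h2 (by decide)
    have hs : s = "find_spots" := (by decide : ∀ x ∈ stageList, stIdx x = 2 → x = "find_spots") s (h1 s hsS).1 hsi
    have hm : "find_spots" ∈ S := hs ▸ hsS
    have e0 : "export" ∉ S := no_mem S 2 h1 "export" (by decide)
    have e1 : "scale" ∉ S := no_mem S 2 h1 "scale" (by decide)
    have e2 : "symmetry" ∉ S := no_mem S 2 h1 "symmetry" (by decide)
    have e3 : "integrate" ∉ S := no_mem S 2 h1 "integrate" (by decide)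
    have e4 : "refine" ∉ S := no_mem S 2 h1 "refine" (by decide)
    have e5 : "index" ∉ S := no_mem S 2 h1 "index" (by decide)
    have hcs : pvScanStage pvWorkflowOrder.reverse S = "find_spots" := by
      rw [hrev]; simp [pvScanStage, hm, e0, e1, e2, e3, e4, e5]
    simp only [pvArender, hcs]; decide
  · -- b = 3
    obtain ⟨s, hsS, hsi⟩ := h2 (by decide)
    have hs : s = "index" := (by decide : ∀ x ∈ stageList, stIdx x = 3 → x = "index") s (h1 s hsS).1 hsi
    have hm : "index" ∈ S := hs ▸ hsS
    have e0 : "export" ∉ S := no_mem S 3 h1 "export" (by decide)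
    have e1 : "scale" ∉ S := no_mem S 3 h1 "scale" (by decide)
    have e2 : "symmetry" ∉ S := no_mem S 3 h1 "symmetry" (by decide)
    have e3 : "integrate" ∉ S := no_mem S 3 h1 "integrate" (by decide)
    have e4 : "refine" ∉ S := no_mem S 3 h1 "refine" (by decide)
    have hcs : pvScanStage pvWorkflowOrder.reverse S = "index" := by
      rw [hrev]; simp [pvScanStage, hm, e0, e1, e2, e3, e4]
    simp only [pvArender, hcs]; decide
  · -- b = 4
    obtain ⟨s, hsS, hsi⟩ := h2 (by decide)
    have hs : s = "refine" := (by decide : ∀ x ∈ stageList, stIdx x = 4 → x = "refine") s (h1 s hsS).1 hsi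
    have hm : "refine" ∈ S := hs ▸ hsS
    have e0 : "export" ∉ S := no_mem S 4 h1 "export" (by decide)
    have e1 : "scale" ∉ S := no_mem S 4 h1 "scale" (by decide)
    have e2 : "symmetry" ∉ S := no_mem S 4 h1 "symmetry" (by decide)
    have e3 : "integrate" ∉ S := no_mem S 4 h1 "integrate" (by decide)
    have hcs : pvScanStage pvWorkflowOrder.reverse S = "refine" := by
      rw [hrev]; simp [pvScanStage, hm, e0, e1, e2, e3]
    simp only [pvArender, hcs]; decide
  · -- b = 5
    obtain ⟨s, hsS, hsi⟩ := h2 (by decide)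
    have hs : s = "integrate" := (by decide : ∀ x ∈ stageList, stIdx x = 5 → x = "integrate") s (h1 s hsS).1 hsi
    have hm : "integrate" ∈ S := hs ▸ hsS
    have e0 : "export" ∉ S := no_mem S 5 h1 "export" (by decide)
    have e1 : "scale" ∉ S := no_mem S 5 h1 "scale" (by decide)
    have e2 : "symmetry" ∉ S := no_mem S 5 h1 "symmetry" (by decide)
    have hcs : pvScanStage pvWorkflowOrder.reverse S = "integrate" := by
      rw [hrev]; simp [pvScanStage, hm, e0, e1, e2]
    simp only [pvArender, hcs]; decide
  · -- b = 6
    obtain ⟨s, hsS, hsi⟩ := h2 (by decide)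
    have hs : s = "symmetry" := (by decide : ∀ x ∈ stageList, stIdx x = 6 → x = "symmetry") s (h1 s hsS).1 hsi
    have hm : "symmetry" ∈ S := hs ▸ hsS
    have e0 : "export" ∉ S := no_mem S 6 h1 "export" (by decide)
    have e1 : "scale" ∉ S := no_mem S 6 h1 "scale" (by decide)
    have hcs : pvScanStage pvWorkflowOrder.reverse S = "symmetry" := by
      rw [hrev]; simp [pvScanStage, hm, e0, e1]
    simp only [pvArender, hcs]; decide
  · -- b = 7
    obtain ⟨s, hsS, hsi⟩ := h2 (by decide)
    have hs : s = "scale" := (by decide : ∀ x ∈ stageList, stIdx x = 7 → x = "scale") s (h1 s hsS).1 hsi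
    have hm : "scale" ∈ S := hs ▸ hsS
    have e0 : "export" ∉ S := no_mem S 7 h1 "export" (by decide)
    have hcs : pvScanStage pvWorkflowOrder.reverse S = "scale" := by
      rw [hrev]; simp [pvScanStage, hm, e0]
    simp only [pvArender, hcs]; decide

-- ===== VERDICT (by name: the statement is the Claim_ definition above) =====
theorem determine_workflow_stage_spec : Claim_equal_determine_workflow_stage := by
  intro files _
  unfold Spec_determine_workflow_stage
  have h := fold_inv files PySem.Set.empty (-1) (by refine ⟨by decide, ?_, by simp⟩; intro s hs; cases hs)
  have hA : determine_workflow_stage files = pvArender (files.foldl stepA PySem.Set.empty) := rfl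
  have hB : determine_workflow_stage_alt files = pvBrender (files.foldl stepB (-1)) := rfl
  rw [hA, hB, render_eq _ _ h]
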